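-- pv_equiv track=rewrite | github.com/deepzsenu/DSA-to-Devlopment | LeetCode/Contest/Weekly 453/4.py | _segment_cost_core
-- ===== SOURCE A (Python) =====
-- from collections import Counter
--
-- def _segment_cost_core(s1: str, s2: str) -> int:
--
--     mismatch = [(a, b) for a, b in zip(s1, s2) if a != b]
--     count = Counter(mismatch)
--     swaps = 0
--     replaces = 0
--
--     for (a, b) in list(count.keys()):
--         if (b, a) in count:
--             pair_count = min(count[(a, b)], count[(b, a)])
--             swaps += pair_count
--             count[(a, b)] -= pair_count
--             count[(b, a)] -= pair_count
--
--     replaces = sum(count.values())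
--
--     return swaps + replaces
-- ===== SOURCE B (Python) =====
-- def _segment_cost_core(s1: str, s2: str) -> int:
--     # One-pass online greedy: walk the zipped characters once; each mismatch (a, b)
--     # either cancels a pending opposite-direction mismatch (b, a) (one swap fixes
--     # both positions: 1 operation) or is parked as pending (it will cost 1 replace
--     # unless a later opposite mismatch cancels it). No mismatch list, no Counter,
--     # no second cancellation pass.
--     pending = {}
--     ops = 0
--     for a, b in zip(s1, s2):
--         if a != b:
--             if pending.get((b, a), 0):
--                 pending[(b, a)] -= 1
--                 ops += 1
--             else:
--                 pending[(a, b)] = pending.get((a, b), 0) + 1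
--     return ops + sum(pending.values())
-- ===== Notes on version B (the rewrite author's own statement) =====
-- stated objective: simpler
-- what changed: B replaces A's two-stage build-a-Counter-of-mismatches-then-cancel-reciprocal-keys pass by a single online greedy pass over the zipped characters that matches each mismatch against a pending opposite-direction mismatch held in a plain dict (no mismatch list, no Counter, no second pass).
import Mathlib
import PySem

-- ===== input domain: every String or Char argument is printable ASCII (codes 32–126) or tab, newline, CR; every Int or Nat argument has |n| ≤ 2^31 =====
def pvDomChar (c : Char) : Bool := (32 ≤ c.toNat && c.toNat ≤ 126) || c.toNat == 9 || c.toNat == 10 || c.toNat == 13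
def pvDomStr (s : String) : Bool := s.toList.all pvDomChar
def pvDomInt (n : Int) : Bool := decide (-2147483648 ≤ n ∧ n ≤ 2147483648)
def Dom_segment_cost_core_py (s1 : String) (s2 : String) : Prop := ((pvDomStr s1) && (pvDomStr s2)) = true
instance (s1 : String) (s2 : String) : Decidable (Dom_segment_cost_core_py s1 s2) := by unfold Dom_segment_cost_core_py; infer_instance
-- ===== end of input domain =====

-- B replaces A's build-Counter-then-cancel two-stage pass by a single online greedy
-- pass matching each mismatch against a pending opposite mismatch; objective: simpler.


-- ===== PORT A =====
-- literal port: mismatch list, Counter, key-snapshot loop mutating the Counter, then sum of values.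
-- (count[(a,b)] in Python indexes a key present in the Counter, so getD is exact here.)
def segment_cost_core_py (s1 : String) (s2 : String) : Int :=
  let mismatch := (s1.toList.zip s2.toList).filter (fun p => !(p.1 == p.2))
  let count := PySem.Dict.counter mismatch
  let res := count.keys.foldl
    (fun (st : PySem.Dict (Char × Char) Int × Int) k =>
      if st.1.contains (k.2, k.1) then
        let m := min (st.1.getD k 0) (st.1.getD (k.2, k.1) 0)
        ((st.1.modify k 0 (· - m)).modify (k.2, k.1) 0 (· - m), st.2 + m)
      else st)
    (count, 0)
  let replaces := res.1.values.sum
  res.2 + replaces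

-- ===== PORT B =====
-- port of Source B: one online pass over the zipped characters; a mismatch (a,b) either
-- cancels a pending (b,a) (pending[(b,a)] -= 1 is a read-modify-write on a key the
-- guard proved present, so Dict.modify is exact) or is parked in the pending dict.
def segment_cost_core_py_alt (s1 : String) (s2 : String) : Int :=
  let res := (s1.toList.zip s2.toList).foldl
    (fun (st : PySem.Dict (Char × Char) Int × Int) p =>
      if p.1 == p.2 then st
      else if st.1.getD (p.2, p.1) 0 ≠ 0 then
        (st.1.modify (p.2, p.1) 0 (· - 1), st.2 + 1)
      else
        (st.1.insert (p.1, p.2) (st.1.getD (p.1, p.2) 0 + 1), st.2))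
    (PySem.Dict.empty, 0)
  res.2 + res.1.values.sum

-- ===== PRECONDITION & SPEC =====
def Spec_segment_cost_core_py (s1 : String) (s2 : String) (out : Int) : Prop := out = segment_cost_core_py_alt s1 s2
instance (s1 : String) (s2 : String) (out : Int) : Decidable (Spec_segment_cost_core_py s1 s2 out) := by unfold Spec_segment_cost_core_py; infer_instance

-- ===== CLAIM (what is proved, stated in full; the proofs are below) =====
def Claim_equal_segment_cost_core_py : Prop := ∀ (s1 : String) (s2 : String), Dom_segment_cost_core_py s1 s2 → Spec_segment_cost_core_py s1 s2 (segment_cost_core_py s1 s2)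

-- ===== LEMMAS AND PROOFS =====

-- proof-only abbreviation of A's loop body (definitionally equal to the lambda in the port)
def pvStep (st : PySem.Dict (Char × Char) Int × Int) (k : Char × Char) :
    PySem.Dict (Char × Char) Int × Int :=
  if st.1.contains (k.2, k.1) then
    let m := min (st.1.getD k 0) (st.1.getD (k.2, k.1) 0)
    ((st.1.modify k 0 (· - m)).modify (k.2, k.1) 0 (· - m), st.2 + m)
  else st

-- proof-only abbreviation of B's loop body (definitionally equal to the lambda in the port)
def pvBStep (st : PySem.Dict (Char × Char) Int × Int) (p : Char × Char) :
    PySem.Dict (Char × Char) Int × Int :=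
  if p.1 == p.2 then st
  else if st.1.getD (p.2, p.1) 0 ≠ 0 then
    (st.1.modify (p.2, p.1) 0 (· - 1), st.2 + 1)
  else
    (st.1.insert (p.1, p.2) (st.1.getD (p.1, p.2) 0 + 1), st.2)

def pvRev (k : Char × Char) : Char × Char := (k.2, k.1)

-- weight of a mismatch pair: the number of swaps its two directions can form
def pvW (c : Char × Char → Int) (k : Char × Char) : Int := min (c k) (c (pvRev k))

-- how much A's loop has subtracted from key k after processing prefix P of the keys
def pvAdj (ks P : List (Char × Char)) (c : Char × Char → Int) (k : Char × Char) : Int :=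
  if pvRev k ∈ ks ∧ (k ∈ P ∨ pvRev k ∈ P) then pvW c k else 0

-- A's swap count after processing prefix P, written as a sum over the a<b representatives
def pvS (ks P : List (Char × Char)) (c : Char × Char → Int) : Int :=
  (ks.map (fun j => if j.1 < j.2 ∧ pvRev j ∈ ks ∧ (j ∈ P ∨ pvRev j ∈ P) then pvW c j else 0)).sum

-- mismatch count of k in the prefix P of the zip that B has consumed so far
def pvCnt (P : List (Char × Char)) (k : Char × Char) : Int :=
  ((P.filter (fun p => !(p.1 == p.2))).count k : Int)

-- total swap savings of counts c, summed over the a<b representatives in K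
def pvG (K : List (Char × Char)) (c : Char × Char → Int) : Int :=
  (K.map (fun j => if j.1 < j.2 then min (c j) (c (pvRev j)) else 0)).sum

theorem pvRev_eq_iff (j k : Char × Char) : pvRev j = k ↔ j = pvRev k := by
  constructor <;> (rintro rfl; rfl)

theorem pv_count_beq (a : Char × Char) (l : List (Char × Char)) :
    @List.count _ instBEqProd a l = @List.count _ instBEqOfDecidableEq a l := by
  induction l with
  | nil => rfl
  | cons x t ih => simp only [List.count_cons, ih, beq_iff_eq]

theorem pv_sum_count (L : List (Char × Char)) :
    ((PySem.Set.ofList L).map (fun k => (L.count k : Int))).sum = (L.length : Int) := by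
  have hnd : (PySem.Set.ofList L).Nodup := PySem.Set.nodup_ofList L
  have h1 : ((PySem.Set.ofList L).map (fun k => (L.count k : Int))).sum
      = (PySem.Set.ofList L).toFinset.sum (fun k => (L.count k : Int)) :=
    (List.sum_toFinset _ hnd).symm
  have hset : (PySem.Set.ofList L).toFinset = L.toFinset := by
    ext a; simp [PySem.Set.mem_ofList]
  rw [h1, hset, ← Nat.cast_sum, Finset.sum_congr rfl (fun a _ => pv_count_beq a L)]
  exact congrArg _ (List.sum_toFinset_count_eq_length L)

theorem pv_sum_eq_except {α : Type} [DecidableEq α] (l : List α) (f g : α → Int) (j0 : α)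
    (hl : l.Nodup) (hj : j0 ∈ l) (hfg : ∀ j ∈ l, j ≠ j0 → f j = g j) :
    (l.map g).sum = (l.map f).sum + (g j0 - f j0) := by
  induction l with
  | nil => simp at hj
  | cons a t ih =>
    rw [List.nodup_cons] at hl
    rcases List.mem_cons.mp hj with rfl | hj'
    · have ht : ∀ j ∈ t, f j = g j := fun j hjt =>
        hfg j (List.mem_cons_of_mem _ hjt) (by rintro rfl; exact hl.1 hjt)
      rw [List.map_cons, List.map_cons, List.sum_cons, List.sum_cons,
        List.map_congr_left ht]
      ring
    · have hne : a ≠ j0 := by rintro rfl; exact hl.1 hj'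
      have := ih hl.2 hj' (fun j hjt hne' => hfg j (List.mem_cons_of_mem _ hjt) hne')
      rw [List.map_cons, List.map_cons, List.sum_cons, List.sum_cons, this,
        hfg a (List.mem_cons_self) hne]
      ring

theorem pv_sum_eq_except2 {α : Type} [DecidableEq α] (l : List α) (f g : α → Int) (j0 j1 : α)
    (hl : l.Nodup) (h0 : j0 ∈ l) (h1 : j1 ∈ l) (hne : j0 ≠ j1)
    (hfg : ∀ j ∈ l, j ≠ j0 → j ≠ j1 → f j = g j) :
    (l.map g).sum = (l.map f).sum + (g j0 - f j0) + (g j1 - f j1) := by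
  have hmid := pv_sum_eq_except l f (fun j => if j = j1 then g j else f j) j1 hl h1
    (fun j hj hne' => by simp [hne'])
  have htop := pv_sum_eq_except l (fun j => if j = j1 then g j else f j) g j0 hl h0
    (fun j hj hne' => by
      by_cases hj1 : j = j1
      · simp [hj1]
      · simp [hj1, hfg j hj hne' hj1])
  rw [htop, hmid]
  simp [hne]
  ring

-- the loop invariant of A's Counter-mutating pass
theorem pv_loop (L : List (Char × Char)) (hL : ∀ p ∈ L, p.1 ≠ p.2)
    (R P : List (Char × Char)) (hsplit : PySem.Set.ofList L = P ++ R)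
    (d : PySem.Dict (Char × Char) Int) (s : Int)
    (hkeys : d.keys = PySem.Set.ofList L)
    (hd : ∀ j, d.getD j 0 = (L.count j : Int)
        - pvAdj (PySem.Set.ofList L) P (fun j => (L.count j : Int)) j)
    (hs : s = pvS (PySem.Set.ofList L) P (fun j => (L.count j : Int)))
    (hv : ((PySem.Set.ofList L).map (fun j => d.getD j 0)).sum = (L.length : Int) - 2 * s) :
    (R.foldl pvStep (d, s)).1.keys = PySem.Set.ofList L ∧
    (R.foldl pvStep (d, s)).2
      = pvS (PySem.Set.ofList L) (P ++ R) (fun j => (L.count j : Int)) ∧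
    ((PySem.Set.ofList L).map (fun j => (R.foldl pvStep (d, s)).1.getD j 0)).sum
      = (L.length : Int) - 2 * (R.foldl pvStep (d, s)).2 := by
  induction R generalizing P d s with
  | nil =>
    refine ⟨hkeys, ?_, hv⟩
    simpa using hs
  | cons k R ih =>
    have hnd : (PySem.Set.ofList L).Nodup := PySem.Set.nodup_ofList L
    have hkmem : k ∈ PySem.Set.ofList L := by rw [hsplit]; simp
    have hkP : k ∉ P := by
      intro hmem
      rw [hsplit] at hnd
      exact (List.Nodup.disjoint hnd) hmem (List.mem_cons_self ..)
    have hkL : k ∈ L := (PySem.Set.mem_ofList L k).mp hkmem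
    have hk12 : k.1 ≠ k.2 := hL k hkL
    have hkrev : k ≠ (k.2, k.1) := by
      intro h
      exact hk12 (congrArg Prod.fst h)
    rw [List.foldl_cons]
    by_cases hrevks : (k.2, k.1) ∈ PySem.Set.ofList L
    · -- the reverse pair is a key: the branch of A's loop is taken
      have hcont : d.contains (k.2, k.1) = true := by
        rw [PySem.Dict.contains_eq_decide_mem_keys, hkeys]
        exact decide_eq_true hrevks
      rw [show pvStep (d, s) k
          = ((d.modify k 0 (· - min (d.getD k 0) (d.getD (k.2, k.1) 0))).modify (k.2, k.1) 0
              (· - min (d.getD k 0) (d.getD (k.2, k.1) 0)),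
             s + min (d.getD k 0) (d.getD (k.2, k.1) 0)) by
        unfold pvStep; rw [hcont]; simp]
      have hkeys' : ∀ (m : Int),
          ((d.modify k 0 (· - m)).modify (k.2, k.1) 0 (· - m)).keys = PySem.Set.ofList L := by
        intro m
        rw [PySem.Dict.keys_modify, PySem.Dict.keys_insert_of_contains, PySem.Dict.keys_modify,
          PySem.Dict.keys_insert_of_contains, hkeys]
        · rw [PySem.Dict.contains_eq_decide_mem_keys, hkeys]
          exact decide_eq_true hkmem
        · rw [PySem.Dict.contains_modify, PySem.Dict.contains_eq_decide_mem_keys, hkeys]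
          simp [hrevks]
      by_cases hrevP : (k.2, k.1) ∈ P
      · -- second visit of this unordered pair: the recorded minimum is 0, nothing changes
        have hwk : d.getD k 0 = (L.count k : Int)
            - min (L.count k : Int) (L.count (k.2, k.1) : Int) := by
          rw [hd k]
          simp [pvAdj, pvW, pvRev, hrevks, hrevP]
        have hwrev : d.getD (k.2, k.1) 0 = (L.count (k.2, k.1) : Int)
            - min (L.count (k.2, k.1) : Int) (L.count k : Int) := by
          rw [hd (k.2, k.1)]
          simp [pvAdj, pvW, pvRev, hkmem, hrevP]
        have hm0 : min (d.getD k 0) (d.getD (k.2, k.1) 0) = 0 := by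
          rw [hwk, hwrev]; omega
        rw [hm0]
        have hgetD : ∀ j, ((d.modify k 0 (· - 0)).modify (k.2, k.1) 0 (· - 0)).getD j 0
            = d.getD j 0 := by
          intro j
          simp only [PySem.Dict.getD_modify]
          split_ifs with h1 h2 h3 <;> simp_all
        have hadj : ∀ j, pvAdj (PySem.Set.ofList L) (P ++ [k]) (fun j => (L.count j : Int)) j
            = pvAdj (PySem.Set.ofList L) P (fun j => (L.count j : Int)) j := by
          intro j
          unfold pvAdj
          by_cases h1 : j = k
          · subst h1; simp [pvRev, hrevks, hrevP]
          · by_cases h2 : j = (k.2, k.1)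
            · subst h2; simp [pvRev, hrevP]
            · have h3 : pvRev j ≠ k := by
                rw [Ne, pvRev_eq_iff]; exact h2
              simp [List.mem_append, h1, h3]
        have hpvS : pvS (PySem.Set.ofList L) (P ++ [k]) (fun j => (L.count j : Int))
            = pvS (PySem.Set.ofList L) P (fun j => (L.count j : Int)) := by
          unfold pvS
          refine congrArg _ (List.map_congr_left ?_)
          intro j hj
          by_cases h1 : j = k
          · subst h1; simp [pvRev, hrevP]
          · by_cases h2 : j = (k.2, k.1)
            · subst h2; simp [pvRev, hrevP]
            · have h3 : pvRev j ≠ k := by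
                rw [Ne, pvRev_eq_iff]; exact h2
              simp [List.mem_append, h1, h3]
        have hres := ih (P ++ [k]) (by rw [hsplit]; simp)
          ((d.modify k 0 (· - 0)).modify (k.2, k.1) 0 (· - 0)) (s + 0)
          (hkeys' 0)
          (by intro j; rw [hgetD j, hadj j]; exact hd j)
          (by rw [hpvS, add_zero]; exact hs)
          (by
            rw [List.map_congr_left (fun j _ => hgetD j)]
            rw [hv]; ring)
        simpa using hres
      · -- first visit of this unordered pair: the full minimum is recorded as swaps
        have hwk : d.getD k 0 = (L.count k : Int) := by
          rw [hd k]
          simp [pvAdj, pvRev, hkP, hrevP]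
        have hwrev : d.getD (k.2, k.1) 0 = (L.count (k.2, k.1) : Int) := by
          rw [hd (k.2, k.1)]
          simp [pvAdj, pvRev, hkP, hrevP]
        rw [hwk, hwrev]
        have hgetD : ∀ j, ((d.modify k 0
              (· - min (L.count k : Int) (L.count (k.2, k.1) : Int))).modify
              (k.2, k.1) 0 (· - min (L.count k : Int) (L.count (k.2, k.1) : Int))).getD j 0
            = if j = (k.2, k.1) then (L.count (k.2, k.1) : Int)
                - min (L.count k : Int) (L.count (k.2, k.1) : Int)
              else if j = k then (L.count k : Int)
                - min (L.count k : Int) (L.count (k.2, k.1) : Int)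
              else d.getD j 0 := by
          intro j
          simp only [PySem.Dict.getD_modify]
          split_ifs with h1 h2 h3 <;> simp_all
        have hadj : ∀ j, j ≠ k → j ≠ (k.2, k.1) →
            pvAdj (PySem.Set.ofList L) (P ++ [k]) (fun j => (L.count j : Int)) j
            = pvAdj (PySem.Set.ofList L) P (fun j => (L.count j : Int)) j := by
          intro j h1 h2
          unfold pvAdj
          have h3 : pvRev j ≠ k := by
            rw [Ne, pvRev_eq_iff]; exact h2
          simp [List.mem_append, h1, h3]
        have hd' : ∀ j, (if j = (k.2, k.1) then (L.count (k.2, k.1) : Int)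
                - min (L.count k : Int) (L.count (k.2, k.1) : Int)
              else if j = k then (L.count k : Int)
                - min (L.count k : Int) (L.count (k.2, k.1) : Int)
              else d.getD j 0)
            = (L.count j : Int)
              - pvAdj (PySem.Set.ofList L) (P ++ [k]) (fun j => (L.count j : Int)) j := by
          intro j
          by_cases h2 : j = (k.2, k.1)
          · subst h2
            simp [pvAdj, pvW, pvRev, hkmem]
            omega
          · by_cases h1 : j = k
            · subst h1
              simp [h2, pvAdj, pvW, pvRev, hrevks]
            · rw [if_neg h2, if_neg h1, hadj j h1 h2]
              exact hd j
        have hlin := lt_or_gt_of_ne hk12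
        -- the a<b representative of the pair is the one whose pvS-term flips on
        have hs' : s + min (L.count k : Int) (L.count (k.2, k.1) : Int)
            = pvS (PySem.Set.ofList L) (P ++ [k]) (fun j => (L.count j : Int)) := by
          have hj0mem : (if k.1 < k.2 then k else (k.2, k.1)) ∈ PySem.Set.ofList L := by
            split_ifs <;> assumption
          have hfg : ∀ j ∈ PySem.Set.ofList L, j ≠ (if k.1 < k.2 then k else (k.2, k.1)) →
              (fun j => if j.1 < j.2 ∧ pvRev j ∈ PySem.Set.ofList L ∧ (j ∈ P ∨ pvRev j ∈ P)
                then pvW (fun j => (L.count j : Int)) j else 0) j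
              = (fun j => if j.1 < j.2 ∧ pvRev j ∈ PySem.Set.ofList L
                  ∧ (j ∈ P ++ [k] ∨ pvRev j ∈ P ++ [k])
                then pvW (fun j => (L.count j : Int)) j else 0) j := by
            intro j hj hne
            by_cases h1 : j = k
            · subst h1
              have hlt : ¬ j.1 < j.2 := by
                intro hlt
                exact hne (by rw [if_pos hlt])
              simp [hlt]
            · by_cases h2 : j = (k.2, k.1)
              · subst h2
                have hlt : ¬ (k.2, k.1).1 < (k.2, k.1).2 := by
                  intro hgt
                  exact hne (by rw [if_neg (not_lt.mpr (le_of_lt hgt))])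
                simp [hlt]
              · have h3 : pvRev j ≠ k := by
                  rw [Ne, pvRev_eq_iff]; exact h2
                simp [List.mem_append, h1, h3]
          have hrw := pv_sum_eq_except (PySem.Set.ofList L)
            (fun j => if j.1 < j.2 ∧ pvRev j ∈ PySem.Set.ofList L ∧ (j ∈ P ∨ pvRev j ∈ P)
              then pvW (fun j => (L.count j : Int)) j else 0)
            (fun j => if j.1 < j.2 ∧ pvRev j ∈ PySem.Set.ofList L
                ∧ (j ∈ P ++ [k] ∨ pvRev j ∈ P ++ [k])
              then pvW (fun j => (L.count j : Int)) j else 0)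
            (if k.1 < k.2 then k else (k.2, k.1)) hnd hj0mem hfg
          unfold pvS
          rw [hrw]
          rw [show (List.map (fun j => if j.1 < j.2 ∧ pvRev j ∈ PySem.Set.ofList L
              ∧ (j ∈ P ∨ pvRev j ∈ P) then pvW (fun j => (L.count j : Int)) j else 0)
              (PySem.Set.ofList L)).sum
            = pvS (PySem.Set.ofList L) P (fun j => (L.count j : Int)) from rfl, ← hs]
          rcases hlin with hlt | hgt
          · rw [if_pos hlt]
            simp only []
            rw [if_pos (show k.1 < k.2 ∧ pvRev k ∈ PySem.Set.ofList L
                  ∧ (k ∈ P ++ [k] ∨ pvRev k ∈ P ++ [k]) from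
                ⟨hlt, by simpa [pvRev] using hrevks, Or.inl (by simp)⟩),
              if_neg (show ¬ (k.1 < k.2 ∧ pvRev k ∈ PySem.Set.ofList L
                  ∧ (k ∈ P ∨ pvRev k ∈ P)) from by simp [hkP, pvRev, hrevP])]
            simp [pvW, pvRev]
          · rw [if_neg (not_lt.mpr (le_of_lt hgt))]
            simp only []
            rw [if_pos (show (k.2, k.1).1 < (k.2, k.1).2 ∧ pvRev (k.2, k.1) ∈ PySem.Set.ofList L
                  ∧ ((k.2, k.1) ∈ P ++ [k] ∨ pvRev (k.2, k.1) ∈ P ++ [k]) from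
                ⟨hgt, by simpa [pvRev] using hkmem, Or.inr (by simp [pvRev])⟩),
              if_neg (show ¬ ((k.2, k.1).1 < (k.2, k.1).2 ∧ pvRev (k.2, k.1) ∈ PySem.Set.ofList L
                  ∧ ((k.2, k.1) ∈ P ∨ pvRev (k.2, k.1) ∈ P)) from by simp [pvRev, hrevP, hkP])]
            simp [pvW, pvRev]
            omega
        have hres := ih (P ++ [k]) (by rw [hsplit]; simp)
          ((d.modify k 0 (· - min (L.count k : Int) (L.count (k.2, k.1) : Int))).modify
            (k.2, k.1) 0 (· - min (L.count k : Int) (L.count (k.2, k.1) : Int)))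
          (s + min (L.count k : Int) (L.count (k.2, k.1) : Int))
          (hkeys' _)
          (by intro j; rw [hgetD j]; exact hd' j)
          hs'
          (by
            rw [pv_sum_eq_except2 (PySem.Set.ofList L) (fun j => d.getD j 0)
              (fun j => ((d.modify k 0
                  (· - min (L.count k : Int) (L.count (k.2, k.1) : Int))).modify
                (k.2, k.1) 0 (· - min (L.count k : Int) (L.count (k.2, k.1) : Int))).getD j 0)
              k (k.2, k.1) hnd hkmem hrevks hkrev
              (fun j _ h1 h2 => by simp only []; rw [hgetD j, if_neg h2, if_neg h1])]
            rw [hv, hgetD k, hgetD (k.2, k.1)]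
            simp [hkrev, hwk, hwrev]
            ring)
        simpa using hres
    · -- the reverse pair is not a key: the loop leaves the state unchanged
      have hcont : d.contains (k.2, k.1) = false := by
        rw [PySem.Dict.contains_eq_decide_mem_keys, hkeys]
        exact decide_eq_false hrevks
      rw [show pvStep (d, s) k = (d, s) by unfold pvStep; rw [hcont]; simp]
      have hrevL : (k.2, k.1) ∉ L := fun h => hrevks ((PySem.Set.mem_ofList L _).mpr h)
      have h0 : (L.count (k.2, k.1) : Int) = 0 := by
        rw [List.count_eq_zero.mpr hrevL]; simp
      have hadj : ∀ j, pvAdj (PySem.Set.ofList L) (P ++ [k]) (fun j => (L.count j : Int)) j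
          = pvAdj (PySem.Set.ofList L) P (fun j => (L.count j : Int)) j := by
        intro j
        unfold pvAdj
        by_cases h1 : j = k
        · subst h1; simp [pvRev, hrevks]
        · by_cases h2 : j = (k.2, k.1)
          · subst h2
            simp only [pvW, pvRev, Prod.mk.eta, h0]
            split_ifs <;> omega
          · have h3 : pvRev j ≠ k := by
              rw [Ne, pvRev_eq_iff]; exact h2
            simp [List.mem_append, h1, h3]
      have hpvS : pvS (PySem.Set.ofList L) (P ++ [k]) (fun j => (L.count j : Int))
          = pvS (PySem.Set.ofList L) P (fun j => (L.count j : Int)) := by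
        unfold pvS
        refine congrArg _ (List.map_congr_left ?_)
        intro j hj
        by_cases h1 : j = k
        · subst h1; simp [pvRev, hrevks]
        · have h2 : j ≠ (k.2, k.1) := by
            rintro rfl; exact hrevks hj
          have h3 : pvRev j ≠ k := by
            rw [Ne, pvRev_eq_iff]; exact h2
          simp [List.mem_append, h1, h3]
      have hres := ih (P ++ [k]) (by rw [hsplit]; simp) d s hkeys
        (by intro j; rw [hadj j]; exact hd j)
        (by rw [hpvS]; exact hs)
        hv
      simpa using hres

-- pvCnt over a one-element extension of the consumed prefix
theorem pvCnt_match (P : List (Char × Char)) (p : Char × Char) (hp : p.1 = p.2) :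
    pvCnt (P ++ [p]) = pvCnt P := by
  funext k
  simp [pvCnt, List.filter_append, hp]

theorem pvCnt_mismatch (P : List (Char × Char)) (p k : Char × Char) (hp : p.1 ≠ p.2) :
    pvCnt (P ++ [p]) k = pvCnt P k + if k = p then 1 else 0 := by
  simp only [pvCnt, List.filter_append, List.count_append]
  rw [show List.filter (fun p => !(p.1 == p.2)) [p] = [p] by simp [hp]]
  by_cases hk : k = p
  · subst hk; simp
  · rw [List.count_singleton]
    simp [beq_iff_eq, hk]
    exact fun h => hk h.symm

theorem pvCnt_nonneg (P : List (Char × Char)) (k : Char × Char) : 0 ≤ pvCnt P k := by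
  exact Int.natCast_nonneg _

-- the loop invariant of B's one-pass greedy: the pending dict holds, per ordered pair,
-- the surplus of that direction over its reverse, and ops + Σ pending = mismatches - pvG
theorem pv_bloop (Z : List (Char × Char)) (R P : List (Char × Char)) (hZ : Z = P ++ R)
    (d : PySem.Dict (Char × Char) Int) (ops : Int)
    (hnd : d.keys.Nodup)
    (hd : ∀ k, d.getD k 0 = max (pvCnt P k - pvCnt P (pvRev k)) 0)
    (hsum : ops + (d.keys.map (fun k => d.getD k 0)).sum
        = ((P.filter (fun p => !(p.1 == p.2))).length : Int)
          - pvG (PySem.Set.ofList (Z.filter (fun p => !(p.1 == p.2)))) (pvCnt P)) :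
    (R.foldl pvBStep (d, ops)).1.keys.Nodup ∧
    (R.foldl pvBStep (d, ops)).2
        + ((R.foldl pvBStep (d, ops)).1.keys.map
            (fun k => (R.foldl pvBStep (d, ops)).1.getD k 0)).sum
      = ((Z.filter (fun p => !(p.1 == p.2))).length : Int)
        - pvG (PySem.Set.ofList (Z.filter (fun p => !(p.1 == p.2)))) (pvCnt Z) := by
  induction R generalizing P d ops with
  | nil =>
    have hPZ : Z = P := by simpa using hZ
    subst hPZ
    exact ⟨hnd, hsum⟩
  | cons p R ih =>
    rw [List.foldl_cons]
    by_cases hpp : p.1 = p.2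
    · -- matching position: B skips it, nothing changes
      rw [show pvBStep (d, ops) p = (d, ops) by unfold pvBStep; simp [hpp]]
      refine ih (P ++ [p]) (by rw [hZ]; simp) d ops hnd ?_ ?_
      · intro k; rw [pvCnt_match P p hpp]; exact hd k
      · rw [pvCnt_match P p hpp]
        rw [show ((P ++ [p]).filter (fun p => !(p.1 == p.2))).length
            = (P.filter (fun p => !(p.1 == p.2))).length by simp [List.filter_append, hpp]]
        exact hsum
    · -- mismatch position (a,b)
      have hc : ∀ k, pvCnt (P ++ [p]) k = pvCnt P k + if k = p then 1 else 0 :=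
        fun k => pvCnt_mismatch P p k hpp
      have hlen : (((P ++ [p]).filter (fun q => !(q.1 == q.2))).length : Int)
          = ((P.filter (fun q => !(q.1 == q.2))).length : Int) + 1 := by
        simp [List.filter_append, hpp]
      have hndK : (PySem.Set.ofList (Z.filter (fun q => !(q.1 == q.2)))).Nodup :=
        PySem.Set.nodup_ofList _
      have hpZ : p ∈ Z.filter (fun q => !(q.1 == q.2)) := by
        rw [hZ, List.filter_append]
        exact List.mem_append_right _ (by simp [hpp])
      have hpK : p ∈ PySem.Set.ofList (Z.filter (fun q => !(q.1 == q.2))) :=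
        (PySem.Set.mem_ofList (Z.filter (fun q => !(q.1 == q.2))) p).mpr hpZ
      have hrevne : (p.2, p.1) ≠ p := fun h => hpp (congrArg Prod.fst h).symm
      have hpne : p ≠ (p.2, p.1) := fun h => hrevne h.symm
      have e1 : pvRev (p.2, p.1) = p := rfl
      have e2 : pvRev p = (p.2, p.1) := rfl
      by_cases hnz : d.getD (p.2, p.1) 0 ≠ 0
      · -- a pending opposite mismatch exists: cancel it, one swap
        have hgt : pvCnt P p + 1 ≤ pvCnt P (p.2, p.1) := by
          rw [hd (p.2, p.1), e1] at hnz
          omega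
        have hcont : d.contains (p.2, p.1) = true := by
          cases hcd : d.contains (p.2, p.1) with
          | false => exact absurd (PySem.Dict.getD_of_not_contains d 0 hcd) hnz
          | true => rfl
        rw [show pvBStep (d, ops) p = (d.modify (p.2, p.1) 0 (· - 1), ops + 1) by
          unfold pvBStep; simp [hpp, hnz]]
        have hkeys' : (d.modify (p.2, p.1) 0 (· - 1)).keys = d.keys := by
          rw [PySem.Dict.keys_modify, PySem.Dict.keys_insert_of_contains]
          exact hcont
        have hget' : ∀ k, (d.modify (p.2, p.1) 0 (· - 1)).getD k 0
            = if k = (p.2, p.1) then d.getD (p.2, p.1) 0 - 1 else d.getD k 0 := by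
          intro k
          rw [PySem.Dict.getD_modify]
        have hmemrev : (p.2, p.1) ∈ d.keys := by
          rw [PySem.Dict.contains_eq_decide_mem_keys] at hcont
          exact of_decide_eq_true hcont
        have hrevK : (p.2, p.1) ∈ PySem.Set.ofList (Z.filter (fun q => !(q.1 == q.2))) := by
          have hposn : 0 < (P.filter (fun q => !(q.1 == q.2))).count (p.2, p.1) := by
            have h0 := pvCnt_nonneg P p
            unfold pvCnt at hgt h0
            omega
          refine (PySem.Set.mem_ofList (Z.filter (fun q => !(q.1 == q.2))) (p.2, p.1)).mpr ?_
          rw [hZ, List.filter_append]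
          exact List.mem_append_left _ (List.count_pos_iff.mp hposn)
        have hj0mem : (if p.1 < p.2 then p else (p.2, p.1))
            ∈ PySem.Set.ofList (Z.filter (fun q => !(q.1 == q.2))) := by
          split_ifs <;> assumption
        have hfg : ∀ j ∈ PySem.Set.ofList (Z.filter (fun q => !(q.1 == q.2))),
            j ≠ (if p.1 < p.2 then p else (p.2, p.1)) →
            (fun j => if j.1 < j.2 then min (pvCnt P j) (pvCnt P (pvRev j)) else 0) j
            = (fun j => if j.1 < j.2 then min (pvCnt (P ++ [p]) j) (pvCnt (P ++ [p]) (pvRev j))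
                else 0) j := by
          intro j hj hne
          by_cases h1 : j = p
          · subst h1
            have hlt : ¬ j.1 < j.2 := fun hlt => hne (by rw [if_pos hlt])
            simp [hlt]
          · by_cases h2 : j = (p.2, p.1)
            · subst h2
              have hlt : ¬ (p.2, p.1).1 < (p.2, p.1).2 := by
                intro hgt2
                have hnlt : ¬ p.1 < p.2 := not_lt.mpr (le_of_lt hgt2)
                exact hne (by rw [if_neg hnlt])
              simp [hlt]
            · have h3 : pvRev j ≠ p := fun h => h2 ((pvRev_eq_iff j p).mp h)
              simp only [hc j, hc (pvRev j), if_neg h1, if_neg h3, add_zero]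
        have hGK : pvG (PySem.Set.ofList (Z.filter (fun q => !(q.1 == q.2)))) (pvCnt (P ++ [p]))
            = pvG (PySem.Set.ofList (Z.filter (fun q => !(q.1 == q.2)))) (pvCnt P) + 1 := by
          unfold pvG
          rw [pv_sum_eq_except _ _ _ _ hndK hj0mem hfg]
          rcases lt_or_gt_of_ne hpp with hlt | hgt2
          · rw [if_pos hlt]
            rw [if_pos hlt, if_pos hlt, e2, hc p, hc (p.2, p.1), if_pos rfl, if_neg hrevne]
            omega
          · rw [if_neg (not_lt.mpr (le_of_lt hgt2))]
            rw [if_pos (show (p.2, p.1).1 < (p.2, p.1).2 from hgt2),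
              if_pos (show (p.2, p.1).1 < (p.2, p.1).2 from hgt2), e1,
              hc p, hc (p.2, p.1), if_pos rfl, if_neg hrevne]
            omega
        refine ih (P ++ [p]) (by rw [hZ]; simp) _ _ (by rw [hkeys']; exact hnd) ?_ ?_
        · intro k
          rw [hget' k]
          by_cases hk1 : k = (p.2, p.1)
          · rw [hk1, if_pos rfl, hd (p.2, p.1), e1, hc (p.2, p.1), hc p, if_neg hrevne,
              if_pos rfl]
            omega
          · rw [if_neg hk1, hd k, hc k, hc (pvRev k)]
            by_cases hk2 : k = p
            · rw [hk2, if_pos rfl, e2, if_neg hrevne]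
              omega
            · have h3 : pvRev k ≠ p := fun h => hk1 ((pvRev_eq_iff k p).mp h)
              rw [if_neg hk2, if_neg h3]
              omega
        · rw [hkeys']
          have hS := pv_sum_eq_except d.keys (fun k => d.getD k 0)
            (fun k => (d.modify (p.2, p.1) 0 (· - 1)).getD k 0) (p.2, p.1) hnd hmemrev
            (fun j _ hne => by
              show d.getD j 0 = (d.modify (p.2, p.1) 0 (· - 1)).getD j 0
              rw [hget' j, if_neg hne])
          rw [hS]
          simp only []
          rw [hget' (p.2, p.1), if_pos rfl, hlen, hGK]
          omega
      · -- no pending opposite mismatch: park (a,b)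
        have hz : d.getD (p.2, p.1) 0 = 0 := not_ne_iff.mp hnz
        have hle : pvCnt P (p.2, p.1) ≤ pvCnt P p := by
          rw [hd (p.2, p.1), e1] at hz
          omega
        rw [show pvBStep (d, ops) p = (d.insert p (d.getD p 0 + 1), ops) by
          unfold pvBStep; simp [hpp, hz]]
        have hget' : ∀ k, (d.insert p (d.getD p 0 + 1)).getD k 0
            = if k = p then d.getD p 0 + 1 else d.getD k 0 := by
          intro k
          rw [PySem.Dict.getD_insert]
        have hGK : pvG (PySem.Set.ofList (Z.filter (fun q => !(q.1 == q.2)))) (pvCnt (P ++ [p]))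
            = pvG (PySem.Set.ofList (Z.filter (fun q => !(q.1 == q.2)))) (pvCnt P) := by
          unfold pvG
          refine congrArg _ (List.map_congr_left ?_)
          intro j hj
          show (if j.1 < j.2 then min (pvCnt (P ++ [p]) j) (pvCnt (P ++ [p]) (pvRev j)) else 0)
            = (if j.1 < j.2 then min (pvCnt P j) (pvCnt P (pvRev j)) else 0)
          by_cases h1 : j = p
          · rw [h1]
            by_cases hlt : p.1 < p.2
            · rw [if_pos hlt, if_pos hlt, e2, hc p, hc (p.2, p.1), if_pos rfl, if_neg hrevne]
              omega
            · rw [if_neg hlt, if_neg hlt]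
          · by_cases h2 : j = (p.2, p.1)
            · rw [h2]
              by_cases hlt : (p.2, p.1).1 < (p.2, p.1).2
              · rw [if_pos hlt, if_pos hlt, e1, hc (p.2, p.1), hc p, if_neg hrevne, if_pos rfl]
                omega
              · rw [if_neg hlt, if_neg hlt]
            · have h3 : pvRev j ≠ p := fun h => h2 ((pvRev_eq_iff j p).mp h)
              simp only [hc j, hc (pvRev j), if_neg h1, if_neg h3, add_zero]
        have hd' : ∀ k, (d.insert p (d.getD p 0 + 1)).getD k 0
            = max (pvCnt (P ++ [p]) k - pvCnt (P ++ [p]) (pvRev k)) 0 := by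
          intro k
          rw [hget' k]
          by_cases hk1 : k = p
          · rw [hk1, if_pos rfl, hd p, e2, hc p, hc (p.2, p.1), if_pos rfl, if_neg hrevne]
            omega
          · rw [if_neg hk1]
            by_cases hk2 : k = (p.2, p.1)
            · rw [hk2, hz, e1, hc (p.2, p.1), hc p, if_neg hrevne, if_pos rfl]
              omega
            · have h3 : pvRev k ≠ p := fun h => hk2 ((pvRev_eq_iff k p).mp h)
              rw [hd k, hc k, hc (pvRev k), if_neg hk1, if_neg h3]
              omega
        by_cases hcp : d.contains p = true
        · -- key already pending in this direction: its value is bumped in place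
          have hkeys' : (d.insert p (d.getD p 0 + 1)).keys = d.keys := by
            rw [PySem.Dict.keys_insert_of_contains]
            exact hcp
          have hmemp : p ∈ d.keys := by
            rw [PySem.Dict.contains_eq_decide_mem_keys] at hcp
            exact of_decide_eq_true hcp
          refine ih (P ++ [p]) (by rw [hZ]; simp) _ _ (by rw [hkeys']; exact hnd) hd' ?_
          rw [hkeys']
          have hS := pv_sum_eq_except d.keys (fun k => d.getD k 0)
            (fun k => (d.insert p (d.getD p 0 + 1)).getD k 0) p hnd hmemp
            (fun j _ hne => by
              show d.getD j 0 = (d.insert p (d.getD p 0 + 1)).getD j 0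
              rw [hget' j, if_neg hne])
          rw [hS]
          simp only []
          rw [hget' p, if_pos rfl, hlen, hGK]
          omega
        · -- fresh key: appended to the pending dict
          have hfalse : d.contains p = false := by
            cases h : d.contains p
            · rfl
            · exact absurd h hcp
          have hkeys' : (d.insert p (d.getD p 0 + 1)).keys = d.keys ++ [p] := by
            rw [PySem.Dict.keys_insert_of_not_contains]
            exact hfalse
          have hpnot : p ∉ d.keys := by
            rw [PySem.Dict.contains_eq_decide_mem_keys] at hfalse
            exact of_decide_eq_false hfalse
          have hgd0 : d.getD p 0 = 0 := PySem.Dict.getD_of_not_contains d 0 hfalse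
          refine ih (P ++ [p]) (by rw [hZ]; simp) _ _ ?_ hd' ?_
          · rw [hkeys', List.nodup_append]
            refine ⟨hnd, List.nodup_singleton p, ?_⟩
            intro a ha b hb
            have hbp : b = p := by simpa using hb
            subst hbp
            rintro rfl
            exact hpnot ha
          · rw [hkeys', List.map_append, List.sum_append, List.map_singleton,
              List.sum_singleton]
            rw [List.map_congr_left (l := d.keys)
              (show ∀ j ∈ d.keys, (d.insert p (d.getD p 0 + 1)).getD j 0 = d.getD j 0 from
                fun j hj => by rw [hget' j, if_neg (by rintro rfl; exact hpnot hj)])]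
            rw [hget' p, if_pos rfl, hlen, hGK]
            omega

-- B's value, characterised: total mismatches minus the swap savings pvG
theorem pv_b_value (Z : List (Char × Char)) :
    (Z.foldl pvBStep (PySem.Dict.empty, 0)).2
        + (Z.foldl pvBStep (PySem.Dict.empty, 0)).1.values.sum
      = ((Z.filter (fun p => !(p.1 == p.2))).length : Int)
        - pvG (PySem.Set.ofList (Z.filter (fun p => !(p.1 == p.2)))) (pvCnt Z) := by
  obtain ⟨hbn, hbv⟩ := pv_bloop Z Z [] rfl PySem.Dict.empty 0
    (by simp)
    (by intro k; simp [pvCnt])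
    (by simp [pvG, pvCnt])
  rw [PySem.Dict.values_eq_map_keys _ hbn 0]
  exact hbv

-- ===== VERDICT (by name: the statement is the Claim_ definition above) =====
theorem segment_cost_core_py_spec : Claim_equal_segment_cost_core_py := by
  intro s1 s2 _
  unfold Spec_segment_cost_core_py segment_cost_core_py segment_cost_core_py_alt
  set Z := s1.toList.zip s2.toList with hZdef
  set L := Z.filter (fun p => !(p.1 == p.2)) with hLdef
  have hL : ∀ p ∈ L, p.1 ≠ p.2 := by
    intro p hp
    have := List.of_mem_filter hp
    simpa using this
  -- A's loop, by its invariant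
  have hloop := pv_loop L hL (PySem.Set.ofList L) [] (by simp)
    (PySem.Dict.counter L) 0
    (by simp)
    (by intro j; simp [pvAdj])
    (by simp [pvS])
    (by simpa using pv_sum_count L)
  obtain ⟨hk, hsf, hvf⟩ := hloop
  have hstepA : (fun (st : PySem.Dict (Char × Char) Int × Int) (k : Char × Char) =>
      if st.1.contains (k.2, k.1) then
        let m := min (st.1.getD k 0) (st.1.getD (k.2, k.1) 0)
        ((st.1.modify k 0 (· - m)).modify (k.2, k.1) 0 (· - m), st.2 + m)
      else st) = pvStep := rfl
  have hstepB : (fun (st : PySem.Dict (Char × Char) Int × Int) (p : Char × Char) =>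
      if p.1 == p.2 then st
      else if st.1.getD (p.2, p.1) 0 ≠ 0 then
        (st.1.modify (p.2, p.1) 0 (· - 1), st.2 + 1)
      else
        (st.1.insert (p.1, p.2) (st.1.getD (p.1, p.2) 0 + 1), st.2)) = pvBStep := rfl
  simp only [hstepA, hstepB, PySem.Dict.keys_counter]
  have hndA : (List.foldl pvStep (PySem.Dict.counter L, 0) (PySem.Set.ofList L)).1.keys.Nodup := by
    rw [hk]; exact PySem.Set.nodup_ofList L
  rw [PySem.Dict.values_eq_map_keys _ hndA 0, hk, hvf, hsf, pv_b_value Z]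
  -- both sides are now 'mismatches minus swap savings'; align the two sum formulations
  have hGS : pvS (PySem.Set.ofList L) ([] ++ PySem.Set.ofList L) (fun j => (L.count j : Int))
      = pvG (PySem.Set.ofList L) (pvCnt Z) := by
    have hcnt : pvCnt Z = fun j => (L.count j : Int) := by
      funext j; rfl
    rw [hcnt]
    unfold pvS pvG
    refine congrArg _ (List.map_congr_left ?_)
    intro j hj
    simp only [List.nil_append]
    by_cases hlt : j.1 < j.2
    · by_cases hr : pvRev j ∈ PySem.Set.ofList L
      · simp [hlt, hr, hj, pvW]
      · rw [if_neg (by tauto), if_pos hlt]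
        have hnm : pvRev j ∉ L := fun h => hr ((PySem.Set.mem_ofList L _).mpr h)
        rw [List.count_eq_zero.mpr hnm]
        simp
    · simp [hlt]
  rw [← hGS]
  ring
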